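-- pv_equiv track=rewrite | github.com/henrysouchien/financial-modeling-tools | schema/reader.py | _col_to_index
-- ===== SOURCE A (Python) =====
-- def _col_to_index(col: str) -> int:
--     col = col.upper()
--     index = 0
--     for ch in col:
--         if not ch.isalpha():
--             continue
--         index = index * 26 + (ord(ch) - ord("A") + 1)
--     return index
-- ===== SOURCE B (Python) =====
-- def _col_to_index(col: str) -> int:
--     letters = [c for c in col.upper() if c.isalpha()]
--     total = 0
--     power = 1
--     for c in reversed(letters):
--         total += (ord(c) - ord("A") + 1) * power
--         power *= 26
--     return total
-- ===== Notes on version B (the rewrite author's own statement) =====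
-- stated objective: alternative
-- what changed: Replaces A's left-to-right Horner accumulation (skip-and-continue loop) with a filter of the alphabetic characters followed by a right-to-left positional sum with explicit base-26 powers.
import Mathlib
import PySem

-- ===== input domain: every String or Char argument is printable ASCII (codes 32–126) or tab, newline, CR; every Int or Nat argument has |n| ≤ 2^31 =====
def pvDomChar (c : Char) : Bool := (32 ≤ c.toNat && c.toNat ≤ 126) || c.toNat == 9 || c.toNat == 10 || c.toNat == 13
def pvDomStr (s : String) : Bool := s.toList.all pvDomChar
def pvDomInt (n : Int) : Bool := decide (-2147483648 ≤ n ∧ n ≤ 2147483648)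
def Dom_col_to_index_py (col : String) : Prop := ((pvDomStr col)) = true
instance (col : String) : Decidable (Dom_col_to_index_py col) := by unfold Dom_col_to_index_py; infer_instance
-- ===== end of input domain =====

-- B replaces A's left-to-right Horner accumulation with a filter of the letters
-- followed by a right-to-left pass maintaining an explicit base-26 positional weight (alternative decomposition, same cost).


-- ===== PORT A =====
def col_to_index_py (col : String) : Int :=
  (PySem.Chars.upper col.toList).foldl
    (fun index ch =>
      if !(PySem.Chars.isalpha ch) then index
      else index * 26 + ((ch.toNat : Int) - 65 + 1)) 0

-- ===== PORT B =====
def col_to_index_py_alt (col : String) : Int :=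
  let letters := (PySem.Chars.upper col.toList).filter PySem.Chars.isalpha
  (letters.reverse.foldl
    (fun (s : Int × Int) c => (s.1 + ((c.toNat : Int) - 65 + 1) * s.2, s.2 * 26))
    (0, 1)).1

-- ===== PRECONDITION & SPEC =====
def Spec_col_to_index_py (col : String) (out : Int) : Prop := out = col_to_index_py_alt col
instance (col : String) (out : Int) : Decidable (Spec_col_to_index_py col out) := by unfold Spec_col_to_index_py; infer_instance

-- ===== CLAIM (what is proved, stated in full; the proofs are below) =====
def Claim_equal_col_to_index_py : Prop := ∀ (col : String), Dom_col_to_index_py col → Spec_col_to_index_py col (col_to_index_py col)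

-- ===== LEMMAS AND PROOFS =====

-- value of one letter
def pvV (c : Char) : Int := ((c.toNat : Int) - 65 + 1)

-- value of a letter list read as little-endian base-26 digits
def pvLE : List Char → Int
  | [] => 0
  | c :: M => pvV c + 26 * pvLE M

lemma pvLE_append_singleton (M : List Char) (c : Char) :
    pvLE (M ++ [c]) = pvLE M + pvV c * 26 ^ M.length := by
  induction M with
  | nil => simp [pvLE]
  | cons d M ih => simp [pvLE, ih]; ring

-- B's right-to-left pass computes t + p · pvLE of the traversed (reversed) letters
lemma pvFoldB (M : List Char) : ∀ t p : Int,
    (M.foldl (fun (s : Int × Int) c => (s.1 + pvV c * s.2, s.2 * 26)) (t, p)).1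
    = t + p * pvLE M := by
  induction M with
  | nil => intro t p; simp [pvLE]
  | cons c M ih => intro t p; simp only [List.foldl_cons, ih, pvLE]; ring

-- A's Horner loop over a letter list equals acc·26^len + the big-endian value
lemma pvHorner_eq (L : List Char) : ∀ acc : Int,
    L.foldl (fun a c => a * 26 + pvV c) acc = acc * 26 ^ L.length + pvLE L.reverse := by
  induction L with
  | nil => intro acc; simp [pvLE]
  | cons c L ih =>
    intro acc
    simp only [List.foldl_cons, ih, List.reverse_cons, pvLE_append_singleton,
      List.length_reverse, List.length_cons]
    ring

-- A's skip-and-continue fold is the Horner fold over the filtered list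
lemma pvFoldA_filter (L : List Char) : ∀ acc : Int,
    L.foldl (fun index ch =>
      if !(PySem.Chars.isalpha ch) then index
      else index * 26 + ((ch.toNat : Int) - 65 + 1)) acc
    = (L.filter PySem.Chars.isalpha).foldl (fun a c => a * 26 + pvV c) acc := by
  induction L with
  | nil => intro acc; rfl
  | cons c L ih =>
    intro acc
    simp only [List.foldl_cons]
    by_cases h : PySem.Chars.isalpha c
    · rw [List.filter_cons_of_pos h, List.foldl_cons, if_neg (by simp [h])]
      exact ih _
    · rw [List.filter_cons_of_neg (by simp [h]), if_pos (by simp [h])]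
      exact ih _

-- ===== VERDICT (by name: the statement is the Claim_ definition above) =====
theorem col_to_index_py_spec : Claim_equal_col_to_index_py := by
  intro col _
  show col_to_index_py col = col_to_index_py_alt col
  simp only [col_to_index_py, col_to_index_py_alt, pvFoldA_filter, pvHorner_eq]
  have := pvFoldB ((PySem.Chars.upper col.toList).filter PySem.Chars.isalpha).reverse 0 1
  simp only [pvV] at this
  rw [this]
  ring
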